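-- pv_equiv track=rewrite | github.com/anyweez/autowiki | scripts/generate-llms.py | generate_llms_full_txt
-- ===== SOURCE A (Python) =====
-- from typing import Dict, List, Optional
--
-- def generate_llms_full_txt(pages: List[Dict], repo_name: str) -> str:
--     """Generate llms-full.txt with complete wiki content."""
--     lines = [
--         f"# {repo_name} Wiki - Complete Content",
--         "",
--         "This file contains the complete content of all wiki pages for AI context.",
--         "",
--         "=" * 80,
--         ""
--     ]
--
--     # Sort pages: overview first, then alphabetically
--     def sort_key(page):
--         if page['type'] == 'overview':
--             return (0, page['title'])
--         return (1, page['title'])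
--
--     sorted_pages = sorted(pages, key=sort_key)
--
--     for page in sorted_pages:
--         lines.append(f"FILE: wiki/{page['path']}")
--         lines.append("-" * 40)
--         lines.append(page['content'])
--         lines.append("")
--         lines.append("=" * 80)
--         lines.append("")
--
--     return '\n'.join(lines)
-- ===== SOURCE B (Python) =====
-- def generate_llms_full_txt(pages, repo_name):
--     """Generate llms-full.txt with complete wiki content."""
--     def key(page):
--         return (0 if page['type'] == 'overview' else 1, page['title'])
--
--     lines = [
--         f"# {repo_name} Wiki - Complete Content",
--         "",
--         "This file contains the complete content of all wiki pages for AI context.",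
--         "",
--         "=" * 80,
--         "",
--     ]
--
--     # Selection sort by repeated extraction: pull the minimum-key page out of
--     # the remaining pool and emit its block immediately, until the pool is empty.
--     # min() returns the FIRST minimal element, so ties keep input order (stable).
--     remaining = list(pages)
--     while remaining:
--         page = min(remaining, key=key)
--         remaining.remove(page)
--         lines.extend([f"FILE: wiki/{page['path']}", "-" * 40, page['content'], "", "=" * 80, ""])
--
--     return '\n'.join(lines)
-- ===== Notes on version B (the rewrite author's own statement) =====
-- stated objective: alternative
-- what changed: Replaces the one-shot sorted() call by a selection loop that repeatedly extracts the minimum-key page from the remaining pool with min()+remove() and emits its six-line block immediately, instead of sorting first and then walking the sorted list.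
import Mathlib
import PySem

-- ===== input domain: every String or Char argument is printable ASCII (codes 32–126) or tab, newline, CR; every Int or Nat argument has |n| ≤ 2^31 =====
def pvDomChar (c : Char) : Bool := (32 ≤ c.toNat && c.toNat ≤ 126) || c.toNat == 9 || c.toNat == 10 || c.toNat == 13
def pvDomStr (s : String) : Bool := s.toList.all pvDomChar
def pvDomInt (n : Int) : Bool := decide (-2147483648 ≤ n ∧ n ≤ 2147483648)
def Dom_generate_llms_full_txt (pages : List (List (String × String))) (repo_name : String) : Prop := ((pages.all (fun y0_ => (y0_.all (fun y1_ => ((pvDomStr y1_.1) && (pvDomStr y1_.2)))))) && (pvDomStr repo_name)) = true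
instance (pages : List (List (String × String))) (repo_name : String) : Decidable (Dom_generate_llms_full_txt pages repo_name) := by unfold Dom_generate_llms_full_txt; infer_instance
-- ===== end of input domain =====

-- B replaces A's library sort by selection-by-repeated-extraction: it repeatedly pulls the
-- minimum-key page (min + remove) out of the remaining pool and emits its block immediately
-- (alternative algorithm; same output).


-- ===== PORT A =====
-- page[k] on the assoc-list dict (first match); KeyError (missing key) is excluded by Pre_.
def pvGet (page : List (String × String)) (k : String) : String :=
  (PySem.Dict.mk page).getD k ""

-- "=" * 80 and "-" * 40 (literal results of the Python constant expressions)
def pvEq80 : String := "================================================================================"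
def pvDash40 : String := "----------------------------------------"

-- the two components of sort_key(page) = (0 if page['type'] == 'overview' else 1, page['title'])
def pvK1 (page : List (String × String)) : Int :=
  if pvGet page "type" == "overview" then 0 else 1
def pvKT (page : List (String × String)) : String := pvGet page "title"

def generate_llms_full_txt (pages : List (List (String × String))) (repo_name : String) : String :=
  let lines : List String :=
    ["# " ++ repo_name ++ " Wiki - Complete Content",
     "",
     "This file contains the complete content of all wiki pages for AI context.",
     "",
     pvEq80,
     ""]
  -- sorted(pages, key=sort_key)
  let sorted_pages := PySem.List.sorted2 pages pvK1 pvKT false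
  let lines := sorted_pages.foldl (fun acc page =>
      (((((acc ++ ["FILE: wiki/" ++ pvGet page "path"]) ++ [pvDash40]) ++ [pvGet page "content"]) ++ [""]) ++ [pvEq80]) ++ [""]) lines
  PySem.Str.join "\n" lines

-- ===== PORT B =====
-- the six lines lines.extend(...) appends for one extracted page
def pvBlock (page : List (String × String)) : List String :=
  ["FILE: wiki/" ++ pvGet page "path", pvDash40, pvGet page "content", "", pvEq80, ""]

-- termination of the while-loop: a successful .remove shortens the pool (used by pvSelLoop)
theorem pv_remove?_length {α : Type} [BEq α] [LawfulBEq α] (xs : List α) (v : α) (rest : List α)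
    (h : PySem.List.remove? xs v = some rest) : rest.length < xs.length := by
  unfold PySem.List.remove? at h
  cases hk : List.idxOf? v xs with
  | none => rw [hk] at h; simp at h
  | some k =>
    rw [hk] at h
    simp only [Option.map_some, Option.some.injEq] at h
    subst h
    have hlt : k < xs.length := (List.idxOf?_eq_some_iff.mp hk).1
    rw [List.length_eraseIdx, if_pos hlt]
    omega

-- the while-loop: pull the first minimum-key page out of `rem`, emit its block, repeat.
-- min2? = Python min(..., key=(flag, title)); none ↔ the pool is empty (loop exit).
def pvSelLoop (rem : List (List (String × String))) (lines : List String) : List String :=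
  match PySem.List.min2? rem pvK1 pvKT with
  | none => lines
  | some m =>
    match hr : PySem.List.remove? rem m with
    | none => lines   -- unreachable: min() returns a member, so .remove cannot fail
    | some rest => pvSelLoop rest (lines ++ pvBlock m)
termination_by rem.length
decreasing_by exact pv_remove?_length rem m rest hr

def generate_llms_full_txt_alt (pages : List (List (String × String))) (repo_name : String) : String :=
  let lines : List String :=
    ["# " ++ repo_name ++ " Wiki - Complete Content",
     "",
     "This file contains the complete content of all wiki pages for AI context.",
     "",
     pvEq80,
     ""]
  PySem.Str.join "\n" (pvSelLoop pages lines)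

-- ===== PRECONDITION & SPEC =====
-- Pre_: every page has the keys 'type', 'title', 'path' and 'content'; on any other input A raises KeyError.
def Pre_generate_llms_full_txt (pages : List (List (String × String))) (_repo_name : String) : Prop :=
  ∀ page ∈ pages, "type" ∈ page.map Prod.fst ∧ "title" ∈ page.map Prod.fst ∧
    "path" ∈ page.map Prod.fst ∧ "content" ∈ page.map Prod.fst
instance (pages : List (List (String × String))) (repo_name : String) : Decidable (Pre_generate_llms_full_txt pages repo_name) := by unfold Pre_generate_llms_full_txt; infer_instance

def pvWitness_generate_llms_full_txt : (List (List (String × String))) × String :=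
  ([[("type", "overview"), ("title", "Start"), ("path", "start.md"), ("content", "Hello")],
    [("type", "page"), ("title", "API"), ("path", "api.md"), ("content", "Docs")]], "demo")

def Spec_generate_llms_full_txt (pages : List (List (String × String))) (repo_name : String) (out : String) : Prop := out = generate_llms_full_txt_alt pages repo_name
instance (pages : List (List (String × String))) (repo_name : String) (out : String) : Decidable (Spec_generate_llms_full_txt pages repo_name out) := by unfold Spec_generate_llms_full_txt; infer_instance

-- ===== CLAIM (what is proved, stated in full; the proofs are below) =====
def Claim_equal_generate_llms_full_txt : Prop := ∀ (pages : List (List (String × String))) (repo_name : String), Dom_generate_llms_full_txt pages repo_name → Pre_generate_llms_full_txt pages repo_name → Spec_generate_llms_full_txt pages repo_name (generate_llms_full_txt pages repo_name)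

-- ===== LEMMAS AND PROOFS =====

-- the strict lexicographic page order that both min2? and sorted2 compare with (proof-side only)
def pvLt (a b : List (String × String)) : Bool :=
  decide (pvK1 a < pvK1 b) || (!decide (pvK1 b < pvK1 a) && decide (pvKT a < pvKT b))

theorem pvLt_irrefl (a : List (String × String)) : pvLt a a = false := by
  simp [pvLt]

theorem pvLt_true_iff (a b : List (String × String)) :
    pvLt a b = true ↔ (pvK1 a < pvK1 b ∨ (¬ pvK1 b < pvK1 a ∧ pvKT a < pvKT b)) := by
  simp [pvLt]

theorem pvLt_false_iff (a b : List (String × String)) :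
    pvLt a b = false ↔ (¬ pvK1 a < pvK1 b ∧ (pvK1 b < pvK1 a ∨ ¬ pvKT a < pvKT b)) := by
  rw [← Bool.not_eq_true, pvLt_true_iff]
  constructor
  · intro h
    by_cases h1 : pvK1 a < pvK1 b
    · exact absurd (Or.inl h1) h
    · refine ⟨h1, ?_⟩
      by_cases hb : pvK1 b < pvK1 a
      · exact Or.inl hb
      · by_cases ht : pvKT a < pvKT b
        · exact absurd (Or.inr ⟨hb, ht⟩) h
        · exact Or.inr ht
  · rintro ⟨h1, h2⟩ (h | ⟨ha, hb⟩)
    · exact h1 h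
    · rcases h2 with h2 | h2
      · exact ha h2
      · exact h2 hb

theorem pvLt_trans (a b c : List (String × String)) (h1 : pvLt a b = true)
    (h2 : pvLt b c = true) : pvLt a c = true := by
  rw [pvLt_true_iff] at *
  rcases h1 with h1 | ⟨h1a, h1b⟩ <;> rcases h2 with h2 | ⟨h2a, h2b⟩
  · exact Or.inl (lt_trans h1 h2)
  · exact Or.inl (lt_of_lt_of_le h1 (not_lt.mp h2a))
  · exact Or.inl (lt_of_le_of_lt (not_lt.mp h1a) h2)
  · exact Or.inr ⟨not_lt.mpr (le_trans (not_lt.mp h1a) (not_lt.mp h2a)), lt_trans h1b h2b⟩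

-- a ≤ b (¬ pvLt b a) and b < c imply a < c
theorem pvLt_neg1 (a b c : List (String × String)) (h1 : pvLt b a = false)
    (h2 : pvLt b c = true) : pvLt a c = true := by
  rw [pvLt_false_iff] at h1
  rw [pvLt_true_iff] at *
  obtain ⟨h1a, h1b⟩ := h1
  rcases h2 with h2 | ⟨h2a, h2b⟩
  · exact Or.inl (lt_of_le_of_lt (not_lt.mp h1a) h2)
  · rcases h1b with h1b | h1b
    · exact Or.inl (lt_of_lt_of_le h1b (not_lt.mp h2a))
    · exact Or.inr ⟨not_lt.mpr (le_trans (not_lt.mp h1a) (not_lt.mp h2a)),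
        lt_of_le_of_lt (not_lt.mp h1b) h2b⟩

-- a < b and b ≤ c (¬ pvLt c b) imply a < c
theorem pvLt_neg2 (a b c : List (String × String)) (h1 : pvLt a b = true)
    (h2 : pvLt c b = false) : pvLt a c = true := by
  rw [pvLt_false_iff] at h2
  rw [pvLt_true_iff] at *
  obtain ⟨h2a, h2b⟩ := h2
  rcases h1 with h1 | ⟨h1a, h1b⟩
  · exact Or.inl (lt_of_lt_of_le h1 (not_lt.mp h2a))
  · rcases h2b with h2b | h2b
    · exact Or.inl (lt_of_le_of_lt (not_lt.mp h1a) h2b)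
    · exact Or.inr ⟨not_lt.mpr (le_trans (not_lt.mp h1a) (not_lt.mp h2a)),
        lt_of_lt_of_le h1b (not_lt.mp h2b)⟩

-- the running first-minimum of Python's min(): seed m, next element y
def pvMin (m y : List (String × String)) : List (String × String) := if pvLt y m then y else m
def pvMFold (a : List (String × String)) (t : List (List (String × String))) :
    List (String × String) := t.foldl pvMin a

theorem pvMFold_seed (x : List (String × String)) :
    ∀ t : List (List (String × String)), (∀ y ∈ t, pvLt y x = false) → pvMFold x t = x := by
  intro t
  induction t with
  | nil => intro _; rfl
  | cons c r ih =>
    intro h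
    have hc : pvMin x c = x := by simp [pvMin, h c (by simp)]
    show pvMFold (pvMin x c) r = x
    rw [hc]
    exact ih (fun y hy => h y (by simp [hy]))

theorem pvMFold_mem (t : List (List (String × String))) :
    ∀ a, pvMFold a t = a ∨ pvMFold a t ∈ t := by
  induction t with
  | nil => intro a; exact Or.inl rfl
  | cons c r ih =>
    intro a
    have hg : pvMFold a (c :: r) = pvMFold (pvMin a c) r := rfl
    rw [hg]
    rcases ih (pvMin a c) with h | h
    · rw [h]
      unfold pvMin
      split
      · exact Or.inr (by simp)
      · exact Or.inl rfl
    · exact Or.inr (List.mem_cons_of_mem c h)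

theorem pvMFold_isMin (t : List (List (String × String))) :
    ∀ a y, (y = a ∨ y ∈ t) → pvLt y (pvMFold a t) = false := by
  induction t with
  | nil =>
    intro a y hy
    rcases hy with rfl | hy
    · exact pvLt_irrefl y
    · simp at hy
  | cons c r ih =>
    intro a y hy
    have hg : pvMFold a (c :: r) = pvMFold (pvMin a c) r := rfl
    rw [hg]
    cases hca : pvLt c a with
    | true =>
      have hm : pvMin a c = c := by simp [pvMin, hca]
      rw [hm]
      rcases hy with hEq | hy
      · -- y is the old seed a, beaten by c
        rw [hEq]
        cases hM : pvLt a (pvMFold c r) with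
        | false => rfl
        | true =>
          have hcM : pvLt c (pvMFold c r) = false := ih c c (Or.inl rfl)
          exact absurd (pvLt_trans c a _ hca hM) (by simp [hcM])
      · rcases List.mem_cons.mp hy with hEq | hyr
        · rw [hEq]; exact ih c c (Or.inl rfl)
        · exact ih c y (Or.inr hyr)
    | false =>
      have hm : pvMin a c = a := by simp [pvMin, hca]
      rw [hm]
      rcases hy with hEq | hy
      · rw [hEq]; exact ih a a (Or.inl rfl)
      · rcases List.mem_cons.mp hy with hEq | hyr
        · -- y = c, which did not beat the seed a
          rw [hEq]
          cases hM : pvLt c (pvMFold a r) with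
          | false => rfl
          | true =>
            have haM : pvLt a (pvMFold a r) = false := ih a a (Or.inl rfl)
            exact absurd (pvLt_neg1 a c _ hca hM) (by simp [haM])
        · exact ih a y (Or.inr hyr)

theorem pvMFold_seed_irrel :
    ∀ (t : List (List (String × String))) (a b : List (String × String)),
      (∃ z ∈ t, pvLt z a = true ∧ pvLt z b = true) → pvMFold a t = pvMFold b t := by
  intro t
  induction t with
  | nil => rintro a b ⟨z, hz, _⟩; simp at hz
  | cons c r ih =>
    rintro a b ⟨z, hz, hza, hzb⟩
    show pvMFold (pvMin a c) r = pvMFold (pvMin b c) r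
    rcases List.mem_cons.mp hz with hEq | hzr
    · subst hEq
      simp [pvMin, hza, hzb]
    · cases hca : pvLt c a with
      | true =>
        cases hcb : pvLt c b with
        | true => simp [pvMin, hca, hcb]
        | false =>
          -- seeds c, b : z beats c (z < b ≤ c) and z beats b
          have h1 : pvMin a c = c := by simp [pvMin, hca]
          have h2 : pvMin b c = b := by simp [pvMin, hcb]
          rw [h1, h2]
          exact ih c b ⟨z, hzr, pvLt_neg2 z b c hzb hcb, hzb⟩
      | false =>
        cases hcb : pvLt c b with
        | true =>
          -- seeds a, c : z beats a and z beats c (z < a ≤ c)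
          have h1 : pvMin a c = a := by simp [pvMin, hca]
          have h2 : pvMin b c = c := by simp [pvMin, hcb]
          rw [h1, h2]
          exact ih a c ⟨z, hzr, hza, pvLt_neg2 z a c hza hca⟩
        | false =>
          have h1 : pvMin a c = a := by simp [pvMin, hca]
          have h2 : pvMin b c = b := by simp [pvMin, hcb]
          rw [h1, h2]
          exact ih a b ⟨z, hzr, hza, hzb⟩

-- Python min over a nonempty pool is the seeded running minimum
theorem pv_min2?_cons (x : List (String × String)) (t : List (List (String × String))) :
    PySem.List.min2? (x :: t) pvK1 pvKT = some (pvMFold x t) := by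
  unfold PySem.List.min2?
  rw [List.foldl_cons]
  show t.foldl _ (some x) = _
  induction t generalizing x with
  | nil => rfl
  | cons c r ih =>
    rw [List.foldl_cons]
    show r.foldl _ (if pvLt c x = true then some c else some x) = some (pvMFold (pvMin x c) r)
    cases h : pvLt c x with
    | true =>
      rw [if_pos rfl, show pvMin x c = c by simp [pvMin, h]]
      exact ih c
    | false =>
      rw [if_neg (by simp), show pvMin x c = x by simp [pvMin, h]]
      exact ih x

-- sorted2 is the left fold of insertions with pvLt
theorem pv_sorted2_eq (l : List (List (String × String))) :
    PySem.List.sorted2 l pvK1 pvKT false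
      = l.foldl (fun acc x => PySem.List.insertBy pvLt x acc) [] := rfl

-- inserting an element smaller than everything in acc puts it at the head
theorem pv_insertBy_head (x : List (String × String)) (acc : List (List (String × String)))
    (h : ∀ a ∈ acc, pvLt x a = true) : PySem.List.insertBy pvLt x acc = x :: acc := by
  cases acc with
  | nil => rfl
  | cons a as => simp [PySem.List.insertBy, h a (by simp)]

-- a head element nothing beats stays at the head through the insertion fold
theorem pv_foldl_ins_head (x : List (String × String)) :
    ∀ (t : List (List (String × String))) (acc : List (List (String × String))),
      (∀ y ∈ t, pvLt y x = false) →
      t.foldl (fun acc z => PySem.List.insertBy pvLt z acc) (x :: acc)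
        = x :: t.foldl (fun acc z => PySem.List.insertBy pvLt z acc) acc := by
  intro t
  induction t with
  | nil => intro acc _; rfl
  | cons y t ih =>
    intro acc h
    have hy : pvLt y x = false := h y (by simp)
    show t.foldl _ (PySem.List.insertBy pvLt y (x :: acc)) = x :: t.foldl _ (PySem.List.insertBy pvLt y acc)
    rw [show PySem.List.insertBy pvLt y (x :: acc) = x :: PySem.List.insertBy pvLt y acc by
      simp [PySem.List.insertBy, hy]]
    exact ih (PySem.List.insertBy pvLt y acc) (fun z hz => h z (by simp [hz]))

-- CRUX: the insertion fold extracts the first minimum to the head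
theorem pv_crux :
    ∀ (t : List (List (String × String))) (x : List (String × String))
      (acc : List (List (String × String))),
      (∀ a ∈ acc, pvLt (pvMFold x t) a = true) →
      (x :: t).foldl (fun acc z => PySem.List.insertBy pvLt z acc) acc
        = pvMFold x t ::
          ((x :: t).erase (pvMFold x t)).foldl (fun acc z => PySem.List.insertBy pvLt z acc) acc := by
  intro t
  induction t with
  | nil =>
    intro x acc hacc
    show PySem.List.insertBy pvLt x acc = x :: ([x].erase x).foldl _ acc
    rw [List.erase_cons_head]
    exact pv_insertBy_head x acc (fun a ha => hacc a ha)
  | cons z r ih =>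
    intro x acc hacc
    by_cases hex : ∃ y ∈ z :: r, pvLt y x = true
    · -- the minimum lies in z :: r
      obtain ⟨y, hy, hyx⟩ := hex
      have hm : pvMFold x (z :: r) = pvMFold z r := by
        show pvMFold (pvMin x z) r = _
        cases hzx : pvLt z x with
        | true => rw [show pvMin x z = z by simp [pvMin, hzx]]
        | false =>
          rw [show pvMin x z = x by simp [pvMin, hzx]]
          rcases List.mem_cons.mp hy with hEq | hyr
          · exact absurd (hEq ▸ hyx) (by simp [hzx])
          · exact pvMFold_seed_irrel r x z ⟨y, hyr, hyx, pvLt_neg2 y x z hyx hzx⟩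
      have hyM : pvLt y (pvMFold z r) = false := by
        rcases List.mem_cons.mp hy with hEq | hyr
        · exact pvMFold_isMin r z y (Or.inl hEq)
        · exact pvMFold_isMin r z y (Or.inr hyr)
      have hmx : pvLt (pvMFold z r) x = true := pvLt_neg1 _ y _ hyM hyx
      have hne : ¬ (x == pvMFold z r) = true := by
        simp only [beq_iff_eq]
        intro he
        rw [← he] at hmx
        exact absurd hmx (by simp [pvLt_irrefl])
      have hacc' : ∀ a ∈ PySem.List.insertBy pvLt x acc, pvLt (pvMFold z r) a = true := by
        intro a ha
        rcases (PySem.List.mem_insertBy pvLt x a acc).mp ha with rfl | ha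
        · exact hmx
        · have := hacc a ha; rwa [hm] at this
      rw [hm, List.erase_cons_tail (by simpa using hne)]
      show (z :: r).foldl _ (PySem.List.insertBy pvLt x acc)
        = pvMFold z r :: ((z :: r).erase (pvMFold z r)).foldl _ (PySem.List.insertBy pvLt x acc)
      exact ih z (PySem.List.insertBy pvLt x acc) hacc'
    · -- x itself is the minimum
      have hall : ∀ y ∈ z :: r, pvLt y x = false := fun y hy =>
        Bool.of_not_eq_true (fun hh => hex ⟨y, hy, hh⟩)
      have hm : pvMFold x (z :: r) = x := pvMFold_seed x (z :: r) hall
      rw [hm, List.erase_cons_head]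
      show (z :: r).foldl _ (PySem.List.insertBy pvLt x acc) = x :: (z :: r).foldl _ acc
      rw [pv_insertBy_head x acc (by rw [hm] at hacc; exact hacc)]
      exact pv_foldl_ins_head x (z :: r) acc hall

-- one extraction step of the stable sort
theorem pv_sorted2_step (x : List (String × String)) (t : List (List (String × String))) :
    PySem.List.sorted2 (x :: t) pvK1 pvKT false
      = pvMFold x t :: PySem.List.sorted2 ((x :: t).erase (pvMFold x t)) pvK1 pvKT false := by
  rw [pv_sorted2_eq, pv_sorted2_eq]
  exact pv_crux t x [] (by simp)

-- the selection loop produces exactly the blocks of the stable sort, in order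
theorem pv_loop_spec :
    ∀ (n : Nat) (rem : List (List (String × String))) (lines : List String),
      rem.length ≤ n →
      pvSelLoop rem lines
        = lines ++ (PySem.List.sorted2 rem pvK1 pvKT false).flatMap pvBlock := by
  intro n
  induction n with
  | zero =>
    intro rem lines h
    have hnil : rem = [] := List.eq_nil_of_length_eq_zero (Nat.le_zero.mp h)
    subst hnil
    rw [pvSelLoop]
    simp [PySem.List.min2?, PySem.List.sorted2]
  | succ n ih =>
    intro rem lines h
    cases rem with
    | nil =>
      rw [pvSelLoop]
      simp [PySem.List.min2?, PySem.List.sorted2]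
    | cons x t =>
      have hm := pv_min2?_cons x t
      have hmem : pvMFold x t ∈ x :: t := by
        rcases pvMFold_mem t x with h' | h'
        · rw [h']; simp
        · exact List.mem_cons_of_mem x h'
      have hr := PySem.List.remove?_eq_some_erase (x :: t) (pvMFold x t) hmem
      rw [pvSelLoop]
      simp only [hm]
      have hlen : ((x :: t).erase (pvMFold x t)).length ≤ n := by
        have h1 := List.length_erase_of_mem hmem
        simp only [List.length_cons] at *
        omega
      split
      · rename_i heq
        rw [hr] at heq
        simp at heq
      · rename_i rest heq
        rw [hr] at heq
        injection heq with heq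
        subst heq
        rw [ih _ _ hlen, pv_sorted2_step]
        simp

-- A's six appends per page are exactly one pvBlock per page
theorem foldl_blocks (l : List (List (String × String))) (init : List String) :
    l.foldl (fun acc page =>
      (((((acc ++ ["FILE: wiki/" ++ pvGet page "path"]) ++ [pvDash40]) ++ [pvGet page "content"]) ++ [""]) ++ [pvEq80]) ++ [""]) init
    = init ++ l.flatMap pvBlock := by
  have : (fun (acc : List String) (page : List (String × String)) =>
      (((((acc ++ ["FILE: wiki/" ++ pvGet page "path"]) ++ [pvDash40]) ++ [pvGet page "content"]) ++ [""]) ++ [pvEq80]) ++ [""])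
      = fun acc page => acc ++ pvBlock page := by
    funext acc page
    simp [pvBlock]
  rw [this, PySem.List.foldl_append_eq_flatMap]

-- ===== VERDICT (by name: the statement is the Claim_ definition above) =====
theorem generate_llms_full_txt_spec : Claim_equal_generate_llms_full_txt := by
  intro pages repo_name _ _
  show generate_llms_full_txt pages repo_name = generate_llms_full_txt_alt pages repo_name
  simp only [generate_llms_full_txt, generate_llms_full_txt_alt]
  rw [foldl_blocks, pv_loop_spec pages.length pages _ (le_refl _)]
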